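-- pv_equiv track=rewrite | github.com/ertgl/xformula | dev/bin/format_exported_py_symbols.py | get_export_expression_span
-- ===== SOURCE A (Python) =====
-- import operator
-- from typing import IO, Callable, Iterable, ParamSpec, TypeVar, cast
--
-- def get_export_expression_span(
--     source: str,
-- ) -> tuple[tuple[int, int, int], tuple[int, int, int]]:
--     line_no = 1
--     column_no = 0
--     start_line_no = -1
--     start_column_no = -1
--     start_offset = -1
--     end_line_no = -1
--     end_column_no = -1
--     end_offset = -1
--     lookbehind: list[tuple[tuple[int, int, int], str]] = []
--     prefix = "__all__=["
--     prefix_chars = list(prefix)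
--     for char_index, char in cast(Iterable[tuple[int, str]], enumerate(source)):
--         if char == "\n":
--             line_no += 1
--             column_no = 0
--         else:
--             column_no += 1
--         if start_offset == -1:
--             if not (char.isspace() or char == "\\"):
--                 lookbehind.append(((line_no, column_no, char_index), char))
--                 if len(lookbehind) > len(prefix_chars):
--                     lookbehind.pop(0)
--             if len(lookbehind) > 0:
--                 lookbehind_value = list(map(operator.itemgetter(1), lookbehind))
--                 found_prefix = lookbehind_value == prefix_chars
--                 is_prefix_at_start = lookbehind[0][0][1] == 1
--                 if found_prefix and is_prefix_at_start:
--                     lookbehind.clear()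
--                     start_line_no = line_no
--                     start_column_no = column_no
--                     start_offset = char_index
--         if start_offset != -1 and char == "]":
--             end_line_no = line_no
--             end_column_no = column_no
--             end_offset = char_index
--             break
--     start = start_line_no, start_column_no, start_offset
--     end = end_line_no, end_column_no, end_offset
--     return start, end
-- ===== SOURCE B (Python) =====
-- def get_export_expression_span(source):
--     # one pass: record (line, col, offset, char) for every non-whitespace, non-backslash char
--     records = []
--     line, col = 1, 0
--     for i, ch in enumerate(source):
--         if ch == '\n':
--             line, col = line + 1, 0
--         else:
--             col += 1
--         if not (ch.isspace() or ch == '\\'):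
--             records.append((line, col, i, ch))
--     prefix = "__all__=["
--     for k in range(len(records)):
--         if records[k][1] == 1 and ''.join(r[3] for r in records[k:k + 9]) == prefix:
--             sl, sc, so, _ = records[k + 8]
--             for el, ec, eo, ech in records[k + 9:]:
--                 if ech == ']':
--                     return (sl, sc, so), (el, ec, eo)
--             return (sl, sc, so), (-1, -1, -1)
--     return (-1, -1, -1), (-1, -1, -1)
-- ===== Notes on version B (the rewrite author's own statement) =====
-- stated objective: faster
-- what changed: A's single fused loop with a mutable 9-element lookbehind window rebuilt and compared on every character is replaced by a three-phase decomposition: one pass materializing position records for all non-whitespace/non-backslash characters, then a window search over that record list for the export prefix starting at column 1, then a scan of the remaining records for the first closing bracket.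
import Mathlib
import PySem

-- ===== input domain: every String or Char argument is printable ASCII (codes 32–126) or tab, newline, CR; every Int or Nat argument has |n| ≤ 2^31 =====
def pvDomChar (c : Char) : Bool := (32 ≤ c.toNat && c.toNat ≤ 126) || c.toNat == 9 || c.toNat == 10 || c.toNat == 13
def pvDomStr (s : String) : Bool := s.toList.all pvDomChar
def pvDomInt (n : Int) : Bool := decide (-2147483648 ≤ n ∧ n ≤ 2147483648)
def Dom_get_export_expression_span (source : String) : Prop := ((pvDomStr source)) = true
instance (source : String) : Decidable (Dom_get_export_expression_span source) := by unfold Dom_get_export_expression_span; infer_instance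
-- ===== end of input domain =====

-- B replaces A's fused sliding-window loop by a different decomposition: one pass collecting all
-- non-whitespace/non-backslash character records, then a window search over that list, then a scan
-- of the remaining records for the closing bracket (measured constant-factor faster; same O(n)).

-- ===== PORT A =====
def pvPrefixA : List Char := ['_', '_', 'a', 'l', 'l', '_', '_', '=', '[']

def pvLoopA : List Char → Int → Int → Int → List ((Int × Int × Int) × Char) → (Int × Int × Int) →
    (Int × Int × Int) × (Int × Int × Int)
  | [], _, _, _, _, start => (start, (-1, -1, -1))
  | c :: rest, idx, line, col, lb, start =>
    let line' := if c = '\n' then line + 1 else line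
    let col'  := if c = '\n' then (0 : Int) else col + 1
    let p :=
      if start.2.2 = -1 then
        let lb1 := if PySem.Chars.isspace c ∨ c = '\\' then lb
                   else
                     let l := lb ++ [((line', col', idx), c)]
                     if 9 < l.length then l.drop 1 else l
        if lb1 ≠ [] ∧ lb1.map Prod.snd = pvPrefixA ∧
            (lb1.headD (((0 : Int), (0 : Int), (0 : Int)), ' ')).1.2.1 = 1 then
          (((line', col', idx) : Int × Int × Int), ([] : List ((Int × Int × Int) × Char)))
        else (start, lb1)
      else (start, lb)
    if p.1.2.2 ≠ -1 ∧ c = ']' then (p.1, (line', col', idx))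
    else pvLoopA rest (idx + 1) line' col' p.2 p.1

def get_export_expression_span (source : String) : (Int × Int × Int) × (Int × Int × Int) :=
  pvLoopA source.toList 0 1 0 [] (-1, -1, -1)

-- ===== PORT B =====
def pvPrefixB : List Char := ['_', '_', 'a', 'l', 'l', '_', '_', '=', '[']

def pvRecordsB : List Char → Int → Int → Int → List (Int × Int × Int × Char)
  | [], _, _, _ => []
  | c :: rest, idx, line, col =>
    let line' := if c = '\n' then line + 1 else line
    let col'  := if c = '\n' then (0 : Int) else col + 1
    if PySem.Chars.isspace c ∨ c = '\\' then pvRecordsB rest (idx + 1) line' col'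
    else (line', col', idx, c) :: pvRecordsB rest (idx + 1) line' col'

def pvFindEndB : List (Int × Int × Int × Char) → Int × Int × Int
  | [] => (-1, -1, -1)
  | (l, c, o, ch) :: rest => if ch = ']' then (l, c, o) else pvFindEndB rest

def pvFindSpanB : List (Int × Int × Int × Char) → (Int × Int × Int) × (Int × Int × Int)
  | [] => ((-1, -1, -1), (-1, -1, -1))
  | r :: rest =>
    if r.2.1 = 1 ∧ ((r :: rest).take 9).map (fun t => t.2.2.2) = pvPrefixB then
      match (r :: rest).drop 8 with
      | s :: after => ((s.1, s.2.1, s.2.2.1), pvFindEndB after)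
      | [] => ((-1, -1, -1), (-1, -1, -1))
    else pvFindSpanB rest

def get_export_expression_span_alt (source : String) : (Int × Int × Int) × (Int × Int × Int) :=
  pvFindSpanB (pvRecordsB source.toList 0 1 0)

-- ===== PRECONDITION & SPEC =====
def Spec_get_export_expression_span (source : String) (out : (Int × Int × Int) × (Int × Int × Int)) : Prop := out = get_export_expression_span_alt source
instance (source : String) (out : (Int × Int × Int) × (Int × Int × Int)) : Decidable (Spec_get_export_expression_span source out) := by unfold Spec_get_export_expression_span; infer_instance

-- ===== CLAIM (what is proved, stated in full; the proofs are below) =====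
def Claim_equal_get_export_expression_span : Prop := ∀ (source : String), Dom_get_export_expression_span source → Spec_get_export_expression_span source (get_export_expression_span source)

-- ===== LEMMAS AND PROOFS =====

theorem pvLoopA_phase2 (cs : List Char) : ∀ (idx line col : Int)
    (lb : List ((Int × Int × Int) × Char)) (s : (Int × Int × Int)), s.2.2 ≠ -1 →
    pvLoopA cs idx line col lb s = (s, pvFindEndB (pvRecordsB cs idx line col)) := by
  induction cs with
  | nil => intro idx line col lb s hs; simp [pvLoopA, pvRecordsB, pvFindEndB]
  | cons c rest ih =>
    intro idx line col lb s hs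
    rw [pvLoopA, pvRecordsB]
    simp only [if_neg hs]
    by_cases hc : c = ']'
    · have hsp : ¬(PySem.Chars.isspace c ∨ c = '\\') := by subst hc; decide
      rw [if_pos ⟨hs, hc⟩, if_neg hsp, pvFindEndB, if_pos hc]
    · rw [if_neg (by exact fun h => hc h.2)]
      by_cases hsp : PySem.Chars.isspace c ∨ c = '\\'
      · rw [if_pos hsp]; exact ih _ _ _ _ _ hs
      · rw [if_neg hsp, pvFindEndB, if_neg hc]; exact ih _ _ _ _ _ hs
def pvConv (r : (Int × Int × Int) × Char) : Int × Int × Int × Char :=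
  (r.1.1, r.1.2.1, r.1.2.2, r.2)

theorem pvFindSpanB_short (l : List (Int × Int × Int × Char)) (h : l.length < 9) :
    pvFindSpanB l = ((-1, -1, -1), (-1, -1, -1)) := by
  induction l with
  | nil => simp [pvFindSpanB]
  | cons a l ih =>
    rw [pvFindSpanB, if_neg, ih (by simp at h ⊢; omega)]
    rintro ⟨-, h2⟩
    have := congrArg List.length h2
    simp [pvPrefixB, List.length_take] at this
    simp at h
    omega

theorem pvFindSpanB_step (a : Int × Int × Int × Char) (l rest : List (Int × Int × Int × Char))
    (hlen : (a :: l).length = 9)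
    (hfail : ¬(a.2.1 = 1 ∧ (a :: l).map (fun t => t.2.2.2) = pvPrefixB)) :
    pvFindSpanB ((a :: l) ++ rest) = pvFindSpanB (l ++ rest) := by
  have htake : (a :: (l ++ rest)).take 9 = a :: l := by
    have := List.take_left' (l₂ := rest) hlen; simpa using this
  rw [List.cons_append, pvFindSpanB, htake, if_neg hfail]

theorem pvFindSpanB_hit (l8 : List (Int × Int × Int × Char)) (e : Int × Int × Int × Char)
    (rest : List (Int × Int × Int × Char)) (hlen : l8.length = 8)
    (hpfx : (l8 ++ [e]).map (fun t => t.2.2.2) = pvPrefixB)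
    (hcol : ((l8 ++ [e]).headD ((0, 0, 0, ' '))).2.1 = 1) :
    pvFindSpanB ((l8 ++ [e]) ++ rest) = ((e.1, e.2.1, e.2.2.1), pvFindEndB rest) := by
  obtain ⟨a, t, rfl⟩ : ∃ a t, l8 = a :: t := by
    cases l8 with
    | nil => simp at hlen
    | cons a t => exact ⟨a, t, rfl⟩
  have htake : (a :: (t ++ (e :: rest))).take 9 = a :: (t ++ [e]) := by
    have := List.take_left' (i := 9) (l₁ := (a :: t) ++ [e]) (l₂ := rest) (by simp at hlen ⊢; omega)
    simpa using this
  have hdrop : (a :: (t ++ (e :: rest))).drop 8 = e :: rest := by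
    have := List.drop_left' (i := 8) (l₁ := a :: t) (l₂ := e :: rest) hlen
    simpa using this
  have hgoal : ((a :: t) ++ [e]) ++ rest = a :: (t ++ (e :: rest)) := by simp
  rw [hgoal, pvFindSpanB, htake, hdrop, if_pos]
  refine ⟨by simpa using hcol, by simpa using hpfx⟩

theorem pvMapCh (lb : List ((Int × Int × Int) × Char)) :
    (lb.map pvConv).map (fun t => t.2.2.2) = lb.map Prod.snd := by
  rw [List.map_map]; rfl

theorem pvLastChar (X : List ((Int × Int × Int) × Char)) (r : (Int × Int × Int) × Char)
    (h : (X ++ [r]).map Prod.snd = pvPrefixA) : r.2 = '[' := by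
  have := congrArg List.getLast? h
  rw [List.map_append] at this
  simp [pvPrefixA] at this
  exact this

theorem pvHeadCol (X : List ((Int × Int × Int) × Char)) (r : (Int × Int × Int) × Char)
    (h : ((X ++ [r]).headD (((0 : Int), (0 : Int), (0 : Int)), ' ')).1.2.1 = 1) :
    ((X.map pvConv ++ [pvConv r]).headD ((0, 0, 0, ' '))).2.1 = 1 := by
  cases X with
  | nil => simpa [pvConv] using h
  | cons b u => simpa [pvConv] using h

theorem pvPfxConv (X : List ((Int × Int × Int) × Char)) (r : (Int × Int × Int) × Char)
    (h : (X ++ [r]).map Prod.snd = pvPrefixA) :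
    (X.map pvConv ++ [pvConv r]).map (fun t => t.2.2.2) = pvPrefixB := by
  rw [show X.map pvConv ++ [pvConv r] = (X ++ [r]).map pvConv by simp, pvMapCh]
  exact h

theorem pvLoopA_main (cs : List Char) : ∀ (idx line col : Int)
    (lb : List ((Int × Int × Int) × Char)), 0 ≤ idx → lb.length ≤ 9 →
    (lb.length = 9 → ¬(lb.map Prod.snd = pvPrefixA ∧
      (lb.headD (((0 : Int), (0 : Int), (0 : Int)), ' ')).1.2.1 = 1)) →
    pvLoopA cs idx line col lb (-1, -1, -1) =
      pvFindSpanB (lb.map pvConv ++ pvRecordsB cs idx line col) := by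
  induction cs with
  | nil =>
    intro idx line col lb hidx hle h9
    rw [pvLoopA, pvRecordsB, List.append_nil]
    rcases lt_or_eq_of_le hle with h | h
    · rw [pvFindSpanB_short _ (by simpa using h)]
    · obtain ⟨a, t, rfl⟩ : ∃ a t, lb = a :: t := by
        cases lb with
        | nil => simp at h
        | cons a t => exact ⟨a, t, rfl⟩
      have hfail := h9 h
      rw [show (a :: t).map pvConv = pvConv a :: t.map pvConv from rfl,
        show (pvConv a :: t.map pvConv) = (pvConv a :: t.map pvConv) ++ [] by simp,
        pvFindSpanB_step _ _ _ (by simp only [List.length_cons, List.length_map] at h ⊢; omega)]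
      · rw [pvFindSpanB_short _ (by simp only [List.length_append, List.length_map, List.length_cons, List.length_nil] at h ⊢; omega)]
      · rintro ⟨hc1, hc2⟩
        refine hfail ⟨?_, ?_⟩
        · rw [← pvMapCh]; simpa using hc2
        · simpa [pvConv] using hc1
  | cons c rest ih =>
    intro idx line col lb hidx hle h9
    conv_lhs => rw [pvLoopA]
    rw [pvRecordsB]
    by_cases hsp : PySem.Chars.isspace c ∨ c = '\\'
    · -- skipped char: lookbehind unchanged
      simp only [if_pos, if_pos hsp]
      have hnf : ¬(lb ≠ [] ∧ lb.map Prod.snd = pvPrefixA ∧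
          (lb.headD (((0 : Int), (0 : Int), (0 : Int)), ' ')).1.2.1 = 1) := by
        rintro ⟨-, hm, hc⟩
        have hl : lb.length = 9 := by
          have := congrArg List.length hm; simpa [pvPrefixA] using this
        exact h9 hl ⟨hm, hc⟩
      rw [if_neg hnf, if_neg (by rintro ⟨h1, -⟩; exact h1 rfl)]
      exact ih _ _ _ _ (by omega) hle h9
    · -- kept char
      by_cases hbig : 9 < (lb ++ [((if c = '\n' then line + 1 else line,
          if c = '\n' then (0 : Int) else col + 1, idx), c)]).length
      · -- lookbehind already full: window slides
        obtain ⟨a, t, rfl⟩ : ∃ a t, lb = a :: t := by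
          cases lb with
          | nil => simp at hbig
          | cons a t => exact ⟨a, t, rfl⟩
        have hlb9 : (a :: t).length = 9 := by simp at hbig hle ⊢; omega
        have hstep : ∀ rest', pvFindSpanB ((a :: t).map pvConv ++ rest') =
            pvFindSpanB (t.map pvConv ++ rest') := by
          intro rest'
          rw [show (a :: t).map pvConv ++ rest' = (pvConv a :: t.map pvConv) ++ rest' from rfl,
            pvFindSpanB_step _ _ _ (by simp at hlb9 ⊢; omega)]
          rintro ⟨hc1, hc2⟩
          refine h9 hlb9 ⟨?_, ?_⟩
          · rw [← pvMapCh]; simpa using hc2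
          · simpa [pvConv] using hc1
        simp only [if_pos, if_neg hsp, if_pos hbig]
        rw [show List.drop 1 ((a :: t) ++ [((if c = '\n' then line + 1 else line,
            if c = '\n' then (0 : Int) else col + 1, idx), c)]) =
            t ++ [((if c = '\n' then line + 1 else line,
            if c = '\n' then (0 : Int) else col + 1, idx), c)] from by simp]
        by_cases hf : (t ++ [((if c = '\n' then line + 1 else line,
              if c = '\n' then (0 : Int) else col + 1, idx), c)]) ≠ [] ∧
            (t ++ [((if c = '\n' then line + 1 else line,
              if c = '\n' then (0 : Int) else col + 1, idx), c)]).map Prod.snd = pvPrefixA ∧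
            ((t ++ [((if c = '\n' then line + 1 else line,
              if c = '\n' then (0 : Int) else col + 1, idx), c)]).headD
              (((0 : Int), (0 : Int), (0 : Int)), ' ')).1.2.1 = 1
        · rw [if_pos hf]
          have hcbr : c = '[' := pvLastChar _ _ hf.2.1
          rw [if_neg (by rintro ⟨-, hc⟩; rw [hcbr] at hc; exact absurd hc (by decide)),
            pvLoopA_phase2 rest _ _ _ _ _ (by simp; omega), hstep,
            show t.map pvConv ++ ((if c = '\n' then line + 1 else line,
              if c = '\n' then (0 : Int) else col + 1, idx, c) ::
              pvRecordsB rest (idx + 1) (if c = '\n' then line + 1 else line)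
                (if c = '\n' then (0 : Int) else col + 1)) =
              (t.map pvConv ++ [pvConv ((if c = '\n' then line + 1 else line,
                if c = '\n' then (0 : Int) else col + 1, idx), c)]) ++
              pvRecordsB rest (idx + 1) (if c = '\n' then line + 1 else line)
                (if c = '\n' then (0 : Int) else col + 1) from by simp [pvConv],
            pvFindSpanB_hit _ _ _ (by simp only [List.length_cons] at hlb9; simp only [List.length_map]; omega) (pvPfxConv _ _ hf.2.1) (pvHeadCol _ _ hf.2.2)]
          rfl
        · rw [if_neg hf, if_neg (by rintro ⟨h1, -⟩; exact h1 rfl),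
            ih _ _ _ _ (by omega) (by simp at hlb9 ⊢; omega)
              (fun _ hmc => hf ⟨by simp, hmc.1, hmc.2⟩), hstep]
          simp [pvConv]
      · -- lookbehind grows
        simp only [if_pos, if_neg hsp, if_neg hbig]
        by_cases hf : (lb ++ [((if c = '\n' then line + 1 else line,
              if c = '\n' then (0 : Int) else col + 1, idx), c)]) ≠ [] ∧
            (lb ++ [((if c = '\n' then line + 1 else line,
              if c = '\n' then (0 : Int) else col + 1, idx), c)]).map Prod.snd = pvPrefixA ∧
            ((lb ++ [((if c = '\n' then line + 1 else line,
              if c = '\n' then (0 : Int) else col + 1, idx), c)]).headD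
              (((0 : Int), (0 : Int), (0 : Int)), ' ')).1.2.1 = 1
        · rw [if_pos hf]
          have hcbr : c = '[' := pvLastChar _ _ hf.2.1
          have hlb8 : lb.length = 8 := by
            have := congrArg List.length hf.2.1
            simp [pvPrefixA] at this
            omega
          rw [if_neg (by rintro ⟨-, hc⟩; rw [hcbr] at hc; exact absurd hc (by decide)),
            pvLoopA_phase2 rest _ _ _ _ _ (by simp; omega),
            show lb.map pvConv ++ ((if c = '\n' then line + 1 else line,
              if c = '\n' then (0 : Int) else col + 1, idx, c) ::
              pvRecordsB rest (idx + 1) (if c = '\n' then line + 1 else line)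
                (if c = '\n' then (0 : Int) else col + 1)) =
              (lb.map pvConv ++ [pvConv ((if c = '\n' then line + 1 else line,
                if c = '\n' then (0 : Int) else col + 1, idx), c)]) ++
              pvRecordsB rest (idx + 1) (if c = '\n' then line + 1 else line)
                (if c = '\n' then (0 : Int) else col + 1) from by simp [pvConv],
            pvFindSpanB_hit _ _ _ (by simp only [List.length_map]; omega) (pvPfxConv _ _ hf.2.1) (pvHeadCol _ _ hf.2.2)]
          rfl
        · rw [if_neg hf, if_neg (by rintro ⟨h1, -⟩; exact h1 rfl),
            ih _ _ _ _ (by omega) (by simp at hbig hle ⊢; omega)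
              (fun _ hmc => hf ⟨by simp, hmc.1, hmc.2⟩)]
          simp [pvConv]

-- ===== VERDICT (by name: the statement is the Claim_ definition above) =====
theorem get_export_expression_span_spec : Claim_equal_get_export_expression_span := by
  intro source _
  unfold Spec_get_export_expression_span get_export_expression_span get_export_expression_span_alt
  simpa using pvLoopA_main source.toList 0 1 0 [] (by norm_num) (by simp) (by simp)
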